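-- pv_equiv track=rewrite | github.com/IlhamFS/uTrip | ItineraryGenerator.py | create_all_possibilities
-- ===== SOURCE A (Python) =====
-- def create_all_possibilities(cat, time):
--   result = ['']
--   for idx,i in enumerate(time):
--     tmp_result = []
--     for a in cat:
--       if idx in cat[a]:
--         for j in result:
--           tmp_result.append(j+a)
--
--     if (tmp_result == []):
--       for j in result:
--         tmp_result.append(j+'-')
--
--     result = tmp_result
--
--   return result
-- ===== SOURCE B (Python) =====
-- def _combos(choices):
--     # cartesian product of the per-slot option lists, built suffix-first:
--     # the first slot varies fastest, the last slot slowest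
--     if not choices:
--         return ['']
--     head = choices[0]
--     return [x + t for t in _combos(choices[1:]) for x in head]
--
--
-- def create_all_possibilities(cat, time):
--     choices = [([a for a in cat if idx in cat[a]] or ['-'])
--                for idx in range(len(time))]
--     return _combos(choices)
-- ===== Notes on version B (the rewrite author's own statement) =====
-- stated objective: simpler
-- what changed: Replaces A's incremental prefix-growing loop (rebuilding the whole result list at every slot with an inline empty-check fallback) by a per-slot options table followed by a recursive Cartesian product built suffix-first.
import Mathlib
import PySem

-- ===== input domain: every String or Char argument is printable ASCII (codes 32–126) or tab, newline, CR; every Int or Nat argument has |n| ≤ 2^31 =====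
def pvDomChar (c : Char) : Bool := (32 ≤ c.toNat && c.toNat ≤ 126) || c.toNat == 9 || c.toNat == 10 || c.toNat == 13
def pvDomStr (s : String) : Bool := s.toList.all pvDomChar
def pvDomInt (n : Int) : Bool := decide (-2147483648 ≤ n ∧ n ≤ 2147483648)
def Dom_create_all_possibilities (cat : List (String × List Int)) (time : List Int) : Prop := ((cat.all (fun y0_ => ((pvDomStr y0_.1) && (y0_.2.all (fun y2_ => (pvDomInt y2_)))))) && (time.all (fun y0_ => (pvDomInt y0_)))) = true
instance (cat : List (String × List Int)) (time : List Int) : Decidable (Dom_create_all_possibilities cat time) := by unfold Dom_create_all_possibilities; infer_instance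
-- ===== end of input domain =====

-- B replaces A's incremental prefix-growing loop by an options table plus a recursive
-- Cartesian product built suffix-first (objective: simpler); return values proved equal.


-- ===== PORT A =====
-- 'cat' is a Python dict: normalise the association list through PySem.Dict.ofList
-- (duplicate keys collapse exactly as a Python dict literal does) and iterate its keys.
def create_all_possibilities (cat : List (String × List Int)) (time : List Int) : List String :=
  let d := PySem.Dict.ofList cat
  (PySem.List.enumerate time).foldl (fun result p =>
    let idx := p.1
    let tmp_result :=
      d.keys.foldl (fun tmp a =>
        if idx ∈ d.getD a [] then tmp ++ result.map (fun j => j ++ a) else tmp) []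
    if tmp_result = [] then result.map (fun j => j ++ "-") else tmp_result) [""]

-- ===== PORT B =====
-- _combos in Source B: Cartesian product, first slot varies fastest
def capCombos : List (List String) → List String
  | [] => [""]
  | c :: rest => (capCombos rest).flatMap (fun t => c.map (fun x => x ++ t))

def create_all_possibilities_alt (cat : List (String × List Int)) (time : List Int) : List String :=
  let d := PySem.Dict.ofList cat
  let choices := (PySem.List.pyRange 0 time.length 1).map (fun idx =>
    let opts := d.keys.filter (fun a => decide (idx ∈ d.getD a []))
    if opts = [] then ["-"] else opts)
  capCombos choices

-- ===== PRECONDITION & SPEC =====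
def Spec_create_all_possibilities (cat : List (String × List Int)) (time : List Int) (out : List String) : Prop := out = create_all_possibilities_alt cat time
instance (cat : List (String × List Int)) (time : List Int) (out : List String) : Decidable (Spec_create_all_possibilities cat time out) := by unfold Spec_create_all_possibilities; infer_instance

-- ===== CLAIM (what is proved, stated in full; the proofs are below) =====
def Claim_equal_create_all_possibilities : Prop := ∀ (cat : List (String × List Int)) (time : List Int), Dom_create_all_possibilities cat time → Spec_create_all_possibilities cat time (create_all_possibilities cat time)

-- ===== LEMMAS AND PROOFS =====

-- A's inner accumulation over the keys is the flatMap over the filtered keys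
theorem capInner (keys : List String) (result : List String) (idx : Int)
    (d : PySem.Dict String (List Int)) (acc : List String) :
    keys.foldl (fun tmp a =>
        if idx ∈ d.getD a [] then tmp ++ result.map (fun j => j ++ a) else tmp) acc
    = acc ++ (keys.filter (fun a => decide (idx ∈ d.getD a []))).flatMap
        (fun a => result.map (fun j => j ++ a)) := by
  induction keys generalizing acc with
  | nil => simp
  | cons a ks ih =>
    by_cases h : idx ∈ d.getD a []
    · simp [List.foldl_cons, h, ih, List.flatMap_cons]
    · simp [List.foldl_cons, h, ih]

-- one step of A, written against the per-slot choice list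
def capStep (result : List String) (c : List String) : List String :=
  c.flatMap (fun a => result.map (fun j => j ++ a))

theorem capStep_flat (K c c' : List String) :
    (capStep K c).flatMap (fun t => c'.map (fun x => x ++ t))
    = capStep (K.flatMap (fun t => c'.map (fun x => x ++ t))) c := by
  simp only [capStep, List.flatMap_assoc, List.flatMap_map, List.map_flatMap,
    List.map_map, Function.comp_def]
  simp [String.append_assoc]

theorem capCombos_append (cs : List (List String)) (c : List String) :
    capCombos (cs ++ [c]) = capStep (capCombos cs) c := by
  induction cs with
  | nil => simp [capCombos, capStep]
  | cons c' cs ih =>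
    have h : capCombos ((c' :: cs) ++ [c])
        = (capCombos (cs ++ [c])).flatMap (fun t => c'.map (fun x => x ++ t)) := rfl
    rw [h, ih, capStep_flat]
    rfl

theorem capCombos_ne_nil (cs : List (List String)) (h : ∀ c ∈ cs, c ≠ []) :
    capCombos cs ≠ [] := by
  induction cs with
  | nil => simp [capCombos]
  | cons c rest ih =>
    have hc : c ≠ [] := h c (by simp)
    have hr := ih (fun x hx => h x (by simp [hx]))
    simp only [capCombos, ne_eq, List.flatMap_eq_nil_iff]
    intro hall
    rcases List.exists_mem_of_ne_nil _ hr with ⟨t, ht⟩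
    have := hall t ht
    simp [List.map_eq_nil_iff] at this
    exact hc this

-- one A-step equals capStep on the choice list, provided result ≠ []
theorem capStep_eq (d : PySem.Dict String (List Int)) (result : List String)
    (idx : Int) (hres : result ≠ []) :
    (let tmp_result :=
      d.keys.foldl (fun tmp a =>
        if idx ∈ d.getD a [] then tmp ++ result.map (fun j => j ++ a) else tmp) [];
     if tmp_result = [] then result.map (fun j => j ++ "-") else tmp_result)
    = capStep result
        (let opts := d.keys.filter (fun a => decide (idx ∈ d.getD a []));
         if opts = [] then ["-"] else opts) := by
  simp only [capInner, List.nil_append]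
  by_cases hf : d.keys.filter (fun a => decide (idx ∈ d.getD a [])) = []
  · simp [hf, capStep, List.flatMap_cons]
  · have hne : (d.keys.filter (fun a => decide (idx ∈ d.getD a []))).flatMap
        (fun a => result.map (fun j => j ++ a)) ≠ [] := by
      simp only [ne_eq, List.flatMap_eq_nil_iff]
      intro hall
      rcases List.exists_mem_of_ne_nil _ hf with ⟨a, ha⟩
      have := hall a ha
      simp [List.map_eq_nil_iff] at this
      exact hres this
    simp [hf, hne, capStep]

-- the per-slot choice lists are never empty
theorem capChoice_ne_nil (d : PySem.Dict String (List Int)) (idx : Int) :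
    (let opts := d.keys.filter (fun a => decide (idx ∈ d.getD a []));
     if opts = [] then ["-"] else opts) ≠ [] := by
  by_cases hf : d.keys.filter (fun a => decide (idx ∈ d.getD a [])) = [] <;> simp [hf]

theorem capMain (d : PySem.Dict String (List Int)) (time : List Int) (s : Int) :
    (PySem.List.enumerate time s).foldl (fun result p =>
      let idx := p.1
      let tmp_result :=
        d.keys.foldl (fun tmp a =>
          if idx ∈ d.getD a [] then tmp ++ result.map (fun j => j ++ a) else tmp) []
      if tmp_result = [] then result.map (fun j => j ++ "-") else tmp_result) [""]
    = capCombos ((PySem.List.pyRange s (s + time.length) 1).map (fun idx =>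
        let opts := d.keys.filter (fun a => decide (idx ∈ d.getD a []))
        if opts = [] then ["-"] else opts)) := by
  induction time using List.reverseRecOn generalizing s with
  | nil => simp [PySem.List.enumerate_nil, capCombos, PySem.List.pyRange_one_eq_nil le_rfl]
  | append_singleton xs x ih =>
    rw [PySem.List.enumerate_append, List.foldl_append, ih s]
    have hsplit : PySem.List.pyRange s (s + (xs ++ [x]).length) 1
        = PySem.List.pyRange s (s + xs.length) 1 ++ [(s + xs.length : Int)] := by
      have : (s + (xs ++ [x]).length : Int) = (s + xs.length) + 1 := by
        simp; ring
      rw [this, PySem.List.pyRange_one_succ_right (by omega)]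
    rw [hsplit, List.map_append, List.map_singleton, capCombos_append]
    simp only [PySem.List.enumerate_cons, PySem.List.enumerate_nil, List.foldl_cons,
      List.foldl_nil]
    refine capStep_eq d _ _ ?_
    apply capCombos_ne_nil
    intro c hc
    simp only [List.mem_map] at hc
    rcases hc with ⟨idx, _, rfl⟩
    exact capChoice_ne_nil d idx

-- ===== VERDICT (by name: the statement is the Claim_ definition above) =====
theorem create_all_possibilities_spec : Claim_equal_create_all_possibilities := by
  intro cat time _
  unfold Spec_create_all_possibilities create_all_possibilities create_all_possibilities_alt
  simpa using capMain (PySem.Dict.ofList cat) time 0
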